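-- pv_equiv track=rewrite | github.com/paschoall/tob-stt | symbolic_reductions/DIFFERENCE/aiml_creator.py | category
-- ===== SOURCE A (Python) =====
-- def category(pattern, template):
-- 	s = "\t<category>\n"
-- 	s += "\t\t<pattern>" + pattern + "</pattern>\n"
-- 	s += "\t\t<template><srai>"
-- 	cnt = 0
-- 	for c in template:
-- 		if c == '*':
-- 			s += "<star index = '" + str(cnt) + "'/>"
-- 			cnt += 1
-- 		else:
-- 			s += c
-- 	s += "</srai></template>\n"
-- 	s += "\t</category>\n"
-- 	return s
-- ===== SOURCE B (Python) =====
-- def category(pattern, template):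
--     segments = template.split('*')
--     body = segments[0]
--     for i, seg in enumerate(segments[1:]):
--         body += "<star index = '" + str(i) + "'/>" + seg
--     return ("\t<category>\n\t\t<pattern>" + pattern
--             + "</pattern>\n\t\t<template><srai>" + body
--             + "</srai></template>\n\t</category>\n")
-- ===== Notes on version B (the rewrite author's own statement) =====
-- stated objective: simpler
-- what changed: B splits the template on '*' into literal segments and rejoins them interleaving the numbered <star/> tags, instead of A's character-by-character scan with an if/else and a running counter.
import Mathlib
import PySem

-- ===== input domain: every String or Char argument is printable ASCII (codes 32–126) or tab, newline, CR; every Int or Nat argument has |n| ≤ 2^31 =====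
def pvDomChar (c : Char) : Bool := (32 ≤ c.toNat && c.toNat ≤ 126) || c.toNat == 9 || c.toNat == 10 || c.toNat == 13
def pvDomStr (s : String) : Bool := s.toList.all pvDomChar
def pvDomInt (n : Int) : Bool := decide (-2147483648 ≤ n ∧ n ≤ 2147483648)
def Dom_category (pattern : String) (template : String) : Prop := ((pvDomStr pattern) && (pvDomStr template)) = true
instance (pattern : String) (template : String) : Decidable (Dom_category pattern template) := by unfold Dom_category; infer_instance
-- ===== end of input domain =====

-- B builds the <srai> body by splitting the template on '*' and rejoining the segments with
-- numbered <star/> tags, instead of A's char-by-char scan with a counter (objective: simpler).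


-- shared literal: the text "<star index = '" + str(n) + "'/>" appearing in both Pythons
def pvStarTag (n : Int) : List Char :=
  "<star index = '".toList ++ PySem.Int.toChars n ++ "'/>".toList

-- ===== PORT A =====
-- literal transliteration of A: string built up by +=, a for-loop over the characters of
-- template with state (s, cnt); strings handled as List Char (Lean's own String.append is
-- kernel-opaque), repacked with String.ofList at the end.
def category (pattern : String) (template : String) : String :=
  let s1 := "\t<category>\n".toList
  let s2 := s1 ++ ("\t\t<pattern>".toList ++ pattern.toList ++ "</pattern>\n".toList)
  let s3 := s2 ++ "\t\t<template><srai>".toList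
  let r := template.toList.foldl
    (fun (acc : List Char × Int) c =>
      if c == '*' then (acc.1 ++ pvStarTag acc.2, acc.2 + 1) else (acc.1 ++ [c], acc.2))
    (s3, 0)
  String.ofList ((r.1 ++ "</srai></template>\n".toList) ++ "\t</category>\n".toList)

-- ===== PORT B =====
-- literal transliteration of B: split on '*', then fold over enumerate(segments[1:])
-- appending star tag + segment.  Python's segments[0] is (segs.headD []): split never
-- returns an empty list, so the IndexError branch is unreachable.
def category_alt (pattern : String) (template : String) : String :=
  let segs := PySem.Chars.splitOn template.toList ['*']
  let body := (PySem.List.enumerate (segs.drop 1) 0).foldl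
      (fun acc (p : Int × List Char) => (acc ++ pvStarTag p.1) ++ p.2) (segs.headD [])
  String.ofList ("\t<category>\n\t\t<pattern>".toList ++ pattern.toList ++
    ("</pattern>\n\t\t<template><srai>".toList ++
      (body ++ "</srai></template>\n\t</category>\n".toList)))

-- ===== PRECONDITION & SPEC =====
def Spec_category (pattern : String) (template : String) (out : String) : Prop := out = category_alt pattern template
instance (pattern : String) (template : String) (out : String) : Decidable (Spec_category pattern template out) := by unfold Spec_category; infer_instance

-- ===== CLAIM (what is proved, stated in full; the proofs are below) =====
def Claim_equal_category : Prop := ∀ (pattern : String) (template : String), Dom_category pattern template → Spec_category pattern template (category pattern template)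

-- ===== LEMMAS AND PROOFS =====

-- reference splitter: pvSpl pre cs = segments of (pre ++ cs) split on '*', pre star-free
def pvSpl : List Char → List Char → List (List Char)
  | pre, [] => [pre]
  | pre, c :: cs => if c == '*' then pre :: pvSpl [] cs else pvSpl (pre ++ [c]) cs

-- reference body: the characters A's loop appends for template cs with counter n
def pvBody : List Char → Int → List Char
  | [], _ => []
  | c :: cs, n => if c == '*' then pvStarTag n ++ pvBody cs (n + 1) else c :: pvBody cs n

lemma pvSpl_ne_nil (pre cs : List Char) : pvSpl pre cs ≠ [] := by
  induction cs generalizing pre with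
  | nil => simp [pvSpl]
  | cons c cs ih => by_cases h : c = '*' <;> simp [pvSpl, h, ih]

lemma splitOn_go_eq (fuel : Nat) : ∀ (l cur : List Char) (accs : List (List Char)),
    l.length < fuel →
    PySem.Chars.splitOn.go ['*'] fuel l cur accs = accs.reverse ++ pvSpl cur.reverse l := by
  induction fuel with
  | zero => intro l cur accs h; omega
  | succ f ih =>
    intro l cur accs h
    match l with
    | [] => simp [PySem.Chars.splitOn.go, pvSpl]
    | c :: rest =>
      rw [PySem.Chars.splitOn.go]
      have hr : rest.length < f := by simpa using Nat.lt_of_succ_lt_succ h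
      by_cases hc : c = '*'
      · simp [List.isPrefixOf, hc, ih _ _ _ hr, pvSpl]
      · simp [List.isPrefixOf, hc, ih _ _ _ hr, pvSpl]
        exact fun heq => absurd heq.symm hc

lemma splitOn_eq_pvSpl (cs : List Char) :
    PySem.Chars.splitOn cs ['*'] = pvSpl [] cs := by
  have := splitOn_go_eq (cs.length + 1) cs [] [] (by omega)
  simpa [PySem.Chars.splitOn] using this

lemma foldA (cs : List Char) : ∀ (p : List Char) (n : Int),
    (cs.foldl (fun (acc : List Char × Int) c =>
      if c == '*' then (acc.1 ++ pvStarTag acc.2, acc.2 + 1) else (acc.1 ++ [c], acc.2))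
      (p, n)).1 = p ++ pvBody cs n := by
  induction cs with
  | nil => simp [pvBody]
  | cons c cs ih =>
    intro p n
    rw [List.foldl_cons]
    by_cases h : (c == '*') = true
    · rw [if_pos h, ih]
      simp [pvBody, beq_iff_eq.mp h]
    · rw [if_neg h, ih]
      have hc : ¬ c = '*' := by simpa using h
      simp [pvBody, hc]

lemma foldB (cs : List Char) : ∀ (pre : List Char) (n : Int) (X : List Char),
    (PySem.List.enumerate ((pvSpl pre cs).drop 1) n).foldl
      (fun acc (p : Int × List Char) => (acc ++ pvStarTag p.1) ++ p.2)
      (X ++ (pvSpl pre cs).headD []) = (X ++ pre) ++ pvBody cs n := by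
  induction cs with
  | nil => simp [pvSpl, pvBody, PySem.List.enumerate_nil]
  | cons c cs ih =>
    intro pre n X
    by_cases h : (c == '*') = true
    · have hc : c = '*' := beq_iff_eq.mp h
      rcases hs : pvSpl [] cs with _ | ⟨r0, rr⟩
      · exact absurd hs (pvSpl_ne_nil [] cs)
      · have hih := ih [] (n + 1) ((X ++ pre) ++ pvStarTag n)
        rw [hs] at hih
        simp only [List.drop_succ_cons, List.drop_zero, List.headD_cons, List.append_nil] at hih
        simp only [pvSpl, h, if_true, hs, List.drop_succ_cons, List.drop_zero, List.headD_cons,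
          PySem.List.enumerate_cons, List.foldl_cons]
        rw [hih]
        simp [pvBody, hc]
    · have hc : ¬ c = '*' := by simpa using h
      have hih := ih (pre ++ [c]) n X
      simp only [pvSpl, h, if_false, Bool.false_eq_true]
      rw [hih]
      simp [pvBody, hc]

-- ===== VERDICT (by name: the statement is the Claim_ definition above) =====
theorem category_spec : Claim_equal_category := by
  intro pattern template _
  unfold Spec_category
  simp only [category, category_alt]
  rw [splitOn_eq_pvSpl]
  have hB := foldB template.toList [] 0 []
  simp only [List.nil_append] at hB
  rw [hB, foldA]
  have h1 : ("\t<category>\n\t\t<pattern>" : String).toList = ("\t<category>\n" : String).toList ++ ("\t\t<pattern>" : String).toList := by decide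
  have h2 : ("</pattern>\n\t\t<template><srai>" : String).toList = ("</pattern>\n" : String).toList ++ ("\t\t<template><srai>" : String).toList := by decide
  have h3 : ("</srai></template>\n\t</category>\n" : String).toList = ("</srai></template>\n" : String).toList ++ ("\t</category>\n" : String).toList := by decide
  rw [h1, h2, h3]
  simp [List.append_assoc]
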